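-- pv_equiv track=rewrite | github.com/prnshubn/machine-learning-fius-tow-mov-detection | src/data/label_generator.py | _erode_segment_boundaries
-- ===== SOURCE A (Python) =====
-- BOUNDARY_EROSION_FRAMES = 2
--
-- def _erode_segment_boundaries(labels, erosion=BOUNDARY_EROSION_FRAMES):
--     """
--     Strips transition frames from the start and end of movement bursts.
--
--     This 'erosion' technique ensures the model trains only on the 'stable' middle
--     section of a movement, avoiding ambiguous start/stop signals.
--
--     Args:
--         labels (list[str]): Per-frame labels ('towards', 'not_towards').
--         erosion (int): Number of frames to strip from each side.
--
--     Returns: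
--         list[str]: The cleaned (eroded) label list.
--     """
--     if erosion <= 0:
--         return labels
--
--     result = list(labels)
--     n = len(result)
--     i = 0
--
--     while i < n:
--         if result[i] == 'towards':
--             # Identify the boundaries of the current 'towards' segment
--             j = i
--             while j < n and result[j] == 'towards':
--                 j += 1
--             seg_len = j - i
--
--             # If the segment is too short to survive erosion, discard it entirely
--             if seg_len <= 2 * erosion:
--                 for k in range(i, j):
--                     result[k] = 'not_towards'
--             else:
--                 # Erode the transition frames at the start and end
--                 for k in range(i, i + erosion):
--                     result[k] = 'not_towards'
--                 for k in range(j - erosion, j):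
--                     result[k] = 'not_towards'
--             i = j
--         else:
--             i += 1
--
--     return result
-- ===== SOURCE B (Python) =====
-- BOUNDARY_EROSION_FRAMES = 2
--
-- def _erode_segment_boundaries(labels, erosion=BOUNDARY_EROSION_FRAMES):
--     if erosion <= 0:
--         return labels
--     n = len(labels)
--
--     def stable(i):
--         # frame i survives erosion iff the whole radius-`erosion` window
--         # around it lies inside the list and is entirely 'towards'
--         return (erosion <= i and i + erosion < n
--                 and all(labels[j] == 'towards'
--                         for j in range(i - erosion, i + erosion + 1)))
--
--     return [lab if lab != 'towards'
--             else ('towards' if stable(i) else 'not_towards')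
--             for i, lab in enumerate(labels)]
-- ===== Notes on version B (the rewrite author's own statement) =====
-- stated objective: alternative
-- what changed: B computes each output frame independently with a sliding-window (morphological erosion) test - a frame stays 'towards' iff its whole radius-erosion neighbourhood lies inside the list and is entirely 'towards' - instead of A's in-place scan that finds run boundaries and overwrites run prefixes/suffixes.
import Mathlib
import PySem

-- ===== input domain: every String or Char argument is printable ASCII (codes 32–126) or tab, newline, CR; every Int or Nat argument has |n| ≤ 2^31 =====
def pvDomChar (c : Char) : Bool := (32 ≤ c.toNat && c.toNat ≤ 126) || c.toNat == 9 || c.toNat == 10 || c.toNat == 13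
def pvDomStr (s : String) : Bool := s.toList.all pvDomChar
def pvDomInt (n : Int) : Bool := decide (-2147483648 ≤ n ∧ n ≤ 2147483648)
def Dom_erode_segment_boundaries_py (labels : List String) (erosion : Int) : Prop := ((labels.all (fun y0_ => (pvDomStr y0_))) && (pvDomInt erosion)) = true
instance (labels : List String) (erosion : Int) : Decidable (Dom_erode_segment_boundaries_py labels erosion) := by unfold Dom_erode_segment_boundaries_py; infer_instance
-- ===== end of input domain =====

-- B replaces A's in-place run scanning/overwriting by an independent per-frame
-- sliding-window (morphological erosion) test; same behaviour, a different algorithm.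

-- ===== PORT A =====

-- inner `while j < n and result[j] == 'towards': j += 1`
def pvScanRun (result : List String) (n j : Nat) : Nat :=
  if _ : j < n ∧ result.getD j "" = "towards" then pvScanRun result n (j + 1) else j
termination_by n - j
decreasing_by omega

-- `for k in range(a, b): result[k] = 'not_towards'` (loop indices are nonnegative, so a Nat counter is exact)
def pvFillLoop (r : List String) (a b : Nat) : List String :=
  if _ : a < b then pvFillLoop (r.set a "not_towards") (a + 1) b else r
termination_by b - a
decreasing_by omega

-- needed for termination of the outer loop: j = pvScanRun … i strictly exceeds i in the 'towards' branch
theorem pvScanRun_ge (result : List String) (n j : Nat) : j ≤ pvScanRun result n j := by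
  rw [pvScanRun]
  split
  · exact le_trans (Nat.le_succ j) (pvScanRun_ge result n (j + 1))
  · exact Nat.le_refl j
termination_by n - j
decreasing_by omega

theorem pvScanRun_gt (result : List String) (n i : Nat) (h1 : i < n)
    (h2 : result.getD i "" = "towards") : i < pvScanRun result n i := by
  rw [pvScanRun]
  rw [dif_pos ⟨h1, h2⟩]
  exact lt_of_lt_of_le (Nat.lt_succ_self i) (pvScanRun_ge result n (i + 1))

-- outer `while i < n: …` (erosion > 0 at every call site, so `.toNat` on it is exact)
def pvErodeLoop (result : List String) (n : Nat) (erosion : Int) (i : Nat) : List String :=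
  if h : i < n then
    if ht : result.getD i "" = "towards" then
      let j := pvScanRun result n i
      let segLen := j - i
      if ((segLen : Int)) ≤ 2 * erosion then
        pvErodeLoop (pvFillLoop result i j) n erosion j
      else
        pvErodeLoop (pvFillLoop (pvFillLoop result i (i + erosion.toNat)) (j - erosion.toNat) j) n erosion j
    else
      pvErodeLoop result n erosion (i + 1)
  else result
termination_by n - i
decreasing_by
  · have := pvScanRun_gt result n i h ht; omega
  · have := pvScanRun_gt result n i h ht; omega
  · omega

def erode_segment_boundaries_py (labels : List String) (erosion : Int) : List String :=
  if erosion ≤ 0 then labels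
  else pvErodeLoop labels labels.length erosion 0

-- ===== PORT B =====

-- `stable(i)`: the guards, then `all(labels[j] == 'towards' for j in range(i-erosion, i+erosion+1))`
def pvStable (labels : List String) (erosion n i : Int) : Bool :=
  decide (erosion ≤ i) && decide (i + erosion < n) &&
  (PySem.List.pyRange (i - erosion) (i + erosion + 1) 1).all
    (fun j => PySem.List.pyGet? labels j == some "towards")

def erode_segment_boundaries_py_alt (labels : List String) (erosion : Int) : List String :=
  if erosion ≤ 0 then labels
  else
    (PySem.List.enumerate labels 0).map (fun p =>
      if p.2 ≠ "towards" then p.2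
      else if pvStable labels erosion labels.length p.1 then "towards" else "not_towards")

-- ===== PRECONDITION & SPEC =====
def Spec_erode_segment_boundaries_py (labels : List String) (erosion : Int) (out : List String) : Prop := out = erode_segment_boundaries_py_alt labels erosion
instance (labels : List String) (erosion : Int) (out : List String) : Decidable (Spec_erode_segment_boundaries_py labels erosion out) := by unfold Spec_erode_segment_boundaries_py; infer_instance

-- ===== CLAIM (what is proved, stated in full; the proofs are below) =====
def Claim_equal_erode_segment_boundaries_py : Prop := ∀ (labels : List String) (erosion : Int), Dom_erode_segment_boundaries_py labels erosion → Spec_erode_segment_boundaries_py labels erosion (erode_segment_boundaries_py labels erosion)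

-- ===== LEMMAS AND PROOFS =====

-- The common reference value: the run-length expansion of the eroded list.
def pvRunLengths : List String → List (String × Nat)
  | [] => []
  | x :: xs => (x, 1 + (xs.takeWhile (· == x)).length) :: pvRunLengths (xs.dropWhile (· == x))
termination_by l => l.length
decreasing_by
  have := List.length_dropWhile_le (· == x) xs
  simp only [List.length_cons]; omega

def pvErodeRun (erosion : Int) (v : String) (len : Nat) : List String :=
  if v = "towards" then
    if ((len : Int)) ≤ 2 * erosion then List.replicate len "not_towards"
    else
      List.replicate erosion.toNat "not_towards" ++
      List.replicate (len - 2 * erosion.toNat) "towards" ++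
      List.replicate erosion.toNat "not_towards"
  else List.replicate len v

def pvRuns (e : Int) (l : List String) : List String :=
  (pvRunLengths l).flatMap (fun p => pvErodeRun e p.1 p.2)

-- ---------- A-side: pvErodeLoop = pvRuns ----------

theorem pv_getD_append (done rest : List String) (k : Nat) :
    (done ++ rest).getD (done.length + k) "" = rest.getD k "" := by
  simp [List.getD, List.getElem?_append_right (Nat.le_add_right done.length k)]

theorem pv_set_append (done : List String) (v r : String) (rs : List String) :
    (done ++ r :: rs).set done.length v = done ++ v :: rs := by
  induction done with
  | nil => simp
  | cons d ds ih => simp [ih]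

theorem pv_tw_replicate (l : List String) (s : String) :
    l.takeWhile (· == s) = List.replicate (l.takeWhile (· == s)).length s := by
  apply List.eq_replicate_of_mem
  intro b hb
  have := List.mem_takeWhile_imp hb
  simpa using this

theorem pv_tw_dw_nil (p : String → Bool) (l : List String) :
    (l.dropWhile p).takeWhile p = [] := by
  induction l with
  | nil => rfl
  | cons x xs ih =>
    by_cases hx : p x
    · simpa [List.dropWhile_cons, hx] using ih
    · simp [hx]

theorem pv_tw_repl_append (m : Nat) (dw : List String)
    (hdw : dw.takeWhile (· == "towards") = []) :
    (List.replicate m "towards" ++ dw).takeWhile (· == "towards")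
      = List.replicate m "towards" := by
  induction m with
  | zero => simpa using hdw
  | succ m ih => simpa [List.replicate_succ, List.takeWhile_cons] using ih

theorem pv_drop_repl_append (a b : Nat) (s : String) (l : List String) (h : a ≤ b) :
    (List.replicate b s ++ l).drop a = List.replicate (b - a) s ++ l := by
  induction a generalizing b with
  | zero => simp
  | succ a ih =>
    obtain ⟨b', rfl⟩ : ∃ b', b = b' + 1 := ⟨b - 1, by omega⟩
    simpa [List.replicate_succ] using ih b' (by omega)

theorem pvScanRun_split (rest done l : List String) (n i : Nat)
    (hl : l = done ++ rest) (hn : n = done.length + rest.length) (hi : i = done.length) :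
    pvScanRun l n i = done.length + (rest.takeWhile (· == "towards")).length := by
  subst hl hn hi
  induction rest generalizing done with
  | nil => rw [pvScanRun]; simp
  | cons x xs ih =>
    rw [pvScanRun]
    have hget : (done ++ x :: xs).getD done.length "" = x := by
      simp
    by_cases hx : x = "towards"
    · rw [dif_pos ⟨by simp, by rw [hget, hx]⟩]
      have h2 : done ++ x :: xs = (done ++ [x]) ++ xs := by simp
      have h3 : done.length + (x :: xs).length = (done ++ [x]).length + xs.length := by
        simp; omega
      rw [h2, h3, show done.length + 1 = (done ++ [x]).length from by simp]
      rw [ih (done ++ [x])]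
      simp [hx]
      omega
    · rw [dif_neg]
      · simp [hx]
      · rintro ⟨-, h⟩
        rw [hget] at h
        exact hx h

theorem pvFillLoop_split (done rest : List String) (m : Nat) (hm : m ≤ rest.length)
    (l : List String) (a b : Nat)
    (hl : l = done ++ rest) (ha : a = done.length) (hb : b = done.length + m) :
    pvFillLoop l a b = done ++ List.replicate m "not_towards" ++ rest.drop m := by
  subst hl ha hb
  induction m generalizing done rest with
  | zero => rw [pvFillLoop]; simp
  | succ m ih =>
    obtain ⟨r, rs, rfl⟩ : ∃ r rs, rest = r :: rs := by
      cases rest with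
      | nil => simp at hm
      | cons r rs => exact ⟨r, rs, rfl⟩
    rw [pvFillLoop, dif_pos (by omega)]
    rw [pv_set_append]
    have h2 : done ++ "not_towards" :: rs = (done ++ ["not_towards"]) ++ rs := by simp
    have h3 : done.length + (m + 1) = (done ++ ["not_towards"]).length + m := by simp; omega
    rw [h2, h3, show done.length + 1 = (done ++ ["not_towards"]).length from by simp]
    rw [ih (done ++ ["not_towards"]) rs (by simp at hm; omega)]
    simp [List.replicate_succ]

theorem pvRuns_group (e : Int) (x : String) (xs : List String) (hx : x ≠ "towards") :
    List.replicate ((xs.takeWhile (· == x)).length) x ++ pvRuns e (xs.dropWhile (· == x))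
      = pvRuns e xs := by
  cases xs with
  | nil => simp
  | cons y ys =>
    by_cases hy : y = x
    · rw [hy]
      have h1 : pvRunLengths (x :: ys)
          = (x, 1 + (ys.takeWhile (· == x)).length) :: pvRunLengths (ys.dropWhile (· == x)) := by
        rw [pvRunLengths.eq_def]
      rw [show pvRuns e (x :: ys)
          = pvErodeRun e x (1 + (ys.takeWhile (· == x)).length) ++ pvRuns e (ys.dropWhile (· == x)) from by
        rw [pvRuns, h1]; simp [pvRuns]]
      simp [pvErodeRun, hx, Nat.add_comm]
    · simp [hy, beq_iff_eq]

theorem pvRuns_cons_ne (e : Int) (x : String) (xs : List String) (hx : x ≠ "towards") :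
    pvRuns e (x :: xs) = x :: pvRuns e xs := by
  rw [pvRuns, pvRunLengths]
  simp only [List.flatMap_cons]
  rw [show pvErodeRun e x (1 + (xs.takeWhile (· == x)).length)
      = x :: List.replicate ((xs.takeWhile (· == x)).length) x from by
    simp only [pvErodeRun, if_neg hx]
    rw [Nat.add_comm 1 ((xs.takeWhile (· == x)).length), List.replicate_succ]]
  rw [List.cons_append]
  rw [show (pvRunLengths (xs.dropWhile (· == x))).flatMap (fun p => pvErodeRun e p.1 p.2)
      = pvRuns e (xs.dropWhile (· == x)) from rfl]
  rw [pvRuns_group e x xs hx]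

theorem pvRuns_cons_towards (e : Int) (xs : List String) :
    pvRuns e ("towards" :: xs)
      = pvErodeRun e "towards" (1 + (xs.takeWhile (· == "towards")).length)
        ++ pvRuns e (xs.dropWhile (· == "towards")) := by
  rw [pvRuns, pvRunLengths]
  simp [pvRuns]

theorem pvErodeLoop_run (e : Int) (he : 0 < e) (m : Nat) (hm : 1 ≤ m)
    (dw done l : List String) (n i : Nat)
    (hdw : dw.takeWhile (· == "towards") = [])
    (hl : l = done ++ (List.replicate m "towards" ++ dw))
    (hn : n = done.length + m + dw.length) (hi : i = done.length)
    (IH : ∀ done' l' n' i', l' = done' ++ dw → n' = done'.length + dw.length →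
      i' = done'.length → pvErodeLoop l' n' e i' = done' ++ pvRuns e dw) :
    pvErodeLoop l n e i = done ++ (pvErodeRun e "towards" m ++ pvRuns e dw) := by
  subst hl hn hi
  rw [pvErodeLoop]
  rw [dif_pos (show done.length < done.length + m + dw.length by omega)]
  have hget : (done ++ (List.replicate m "towards" ++ dw)).getD done.length "" = "towards" := by
    have h := pv_getD_append done (List.replicate m "towards" ++ dw) 0
    rw [Nat.add_zero] at h
    rw [h]
    obtain ⟨m', rfl⟩ : ∃ m', m = m' + 1 := ⟨m - 1, by omega⟩
    simp [List.replicate_succ]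
  rw [dif_pos hget]
  have hsc : pvScanRun (done ++ (List.replicate m "towards" ++ dw))
      (done.length + m + dw.length) done.length = done.length + m := by
    have h := pvScanRun_split (List.replicate m "towards" ++ dw) done
      (done ++ (List.replicate m "towards" ++ dw)) (done.length + m + dw.length) done.length
      rfl (by simp [Nat.add_assoc]) rfl
    rw [pv_tw_repl_append m dw hdw] at h
    simpa using h
  simp only [hsc, Nat.add_sub_cancel_left]
  by_cases hshort : ((m : Int)) ≤ 2 * e
  · rw [if_pos hshort]
    rw [pvFillLoop_split done (List.replicate m "towards" ++ dw) m (by simp) _ _ _ rfl rfl rfl]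
    rw [show (List.replicate m "towards" ++ dw).drop m = dw from by
      simp]
    rw [IH (done ++ List.replicate m "not_towards")
      ((done ++ List.replicate m "not_towards") ++ dw)
      (done.length + m + dw.length) (done.length + m)
      rfl (by simp) (by simp)]
    simp [pvErodeRun, hshort, List.append_assoc]
  · rw [if_neg hshort]
    have het : ((e.toNat : Int)) = e := Int.toNat_of_nonneg (le_of_lt he)
    have h2e : 2 * e.toNat < m := by omega
    rw [pvFillLoop_split done (List.replicate m "towards" ++ dw) e.toNat
      (by simp; omega) _ _ _ rfl rfl rfl]
    rw [pv_drop_repl_append e.toNat m "towards" dw (by omega)]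
    rw [show List.replicate (m - e.toNat) "towards"
        = List.replicate (m - 2 * e.toNat) "towards" ++ List.replicate e.toNat "towards" from by
      rw [← List.replicate_add]; congr 1; omega]
    have hfill2 := pvFillLoop_split
      ((done ++ List.replicate e.toNat "not_towards") ++ List.replicate (m - 2 * e.toNat) "towards")
      (List.replicate e.toNat "towards" ++ dw) e.toNat (by simp)
      (done ++ List.replicate e.toNat "not_towards" ++
        ((List.replicate (m - 2 * e.toNat) "towards" ++ List.replicate e.toNat "towards") ++ dw))
      (done.length + m - e.toNat) (done.length + m)
      (by simp only [List.append_assoc]) (by simp; omega) (by simp; omega)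
    rw [hfill2]
    rw [show (List.replicate e.toNat "towards" ++ dw).drop e.toNat = dw from by
      simp]
    rw [IH (done ++ List.replicate e.toNat "not_towards" ++
        List.replicate (m - 2 * e.toNat) "towards" ++ List.replicate e.toNat "not_towards")
      ((done ++ List.replicate e.toNat "not_towards" ++
        List.replicate (m - 2 * e.toNat) "towards" ++ List.replicate e.toNat "not_towards") ++ dw)
      (done.length + m + dw.length) (done.length + m)
      rfl (by simp; omega) (by simp; omega)]
    simp [pvErodeRun, hshort, List.append_assoc]

theorem pvErodeLoop_eq_aux (e : Int) (he : 0 < e) (k : Nat) :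
    ∀ (rest done l : List String) (n i : Nat), rest.length ≤ k →
    l = done ++ rest → n = done.length + rest.length → i = done.length →
    pvErodeLoop l n e i = done ++ pvRuns e rest := by
  induction k with
  | zero =>
    intro rest done l n i hk hl hn hi
    obtain rfl : rest = [] := List.eq_nil_of_length_eq_zero (by omega)
    subst hl hn hi
    rw [pvErodeLoop]
    simp [pvRuns, pvRunLengths]
  | succ k ih =>
    intro rest done l n i hk hl hn hi
    subst hl hn hi
    cases rest with
  | nil =>
    rw [pvErodeLoop]
    simp [pvRuns, pvRunLengths]
  | cons x xs =>
    by_cases hx : x = "towards"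
    · subst hx
      have hdw := pv_tw_dw_nil (· == "towards") xs
      have hsplitlist : "towards" :: xs
          = List.replicate (1 + (xs.takeWhile (· == "towards")).length) "towards"
            ++ xs.dropWhile (· == "towards") := by
        conv_lhs => rw [← List.takeWhile_append_dropWhile (p := (· == "towards")) (l := xs)]
        rw [show ("towards" : String) :: (xs.takeWhile (· == "towards") ++ xs.dropWhile (· == "towards"))
            = ("towards" :: xs.takeWhile (· == "towards")) ++ xs.dropWhile (· == "towards") from rfl]
        congr 1
        rw [Nat.add_comm, List.replicate_succ]
        congr 1
        exact pv_tw_replicate xs "towards"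
      rw [pvRuns_cons_towards]
      refine pvErodeLoop_run e he (1 + (xs.takeWhile (· == "towards")).length) (by omega)
        (xs.dropWhile (· == "towards")) done _ _ _ hdw (by rw [hsplitlist]) ?_ rfl ?_
      · have hlen : ("towards" :: xs).length
            = (1 + (xs.takeWhile (· == "towards")).length) + (xs.dropWhile (· == "towards")).length := by
          conv_lhs => rw [hsplitlist]
          simp
        omega
      · intro done' l' n' i' h1 h2 h3
        exact ih (xs.dropWhile (· == "towards")) done' l' n' i'
          (by have := List.length_dropWhile_le (fun x => x == "towards") xs
              simp at hk; omega) h1 h2 h3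
    · rw [pvErodeLoop]
      rw [dif_pos (by simp)]
      have hget : (done ++ x :: xs).getD done.length "" = x := by
        simp
      rw [dif_neg (show ¬(done ++ x :: xs).getD done.length "" = "towards" from by rw [hget]; exact hx)]
      rw [ih xs (done ++ [x]) _ _ _ (by simp at hk; omega) (by simp) (by simp; omega) (by simp)]
      rw [pvRuns_cons_ne e x xs hx]
      simp

theorem pvErodeLoop_eq (e : Int) (he : 0 < e) (rest done l : List String) (n i : Nat)
    (hl : l = done ++ rest) (hn : n = done.length + rest.length) (hi : i = done.length) :
    pvErodeLoop l n e i = done ++ pvRuns e rest :=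
  pvErodeLoop_eq_aux e he rest.length rest done l n i (Nat.le_refl _) hl hn hi

-- ---------- B-side: the stencil map = pvRuns ----------

-- one output cell of B at absolute index i with label lab
def pvCell (L : List String) (e i : Int) (lab : String) : String :=
  if lab ≠ "towards" then lab
  else if pvStable L e L.length i then "towards" else "not_towards"

def pvFrom (L : List String) (e : Int) : Int → List String → List String
  | _, [] => []
  | off, x :: xs => pvCell L e off x :: pvFrom L e (off + 1) xs

theorem pv_enum_map (L : List String) (e : Int) :
    ∀ (rest : List String) (off : Int),
    (PySem.List.enumerate rest off).map (fun p =>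
        if p.2 ≠ "towards" then p.2
        else if pvStable L e L.length p.1 then "towards" else "not_towards")
      = pvFrom L e off rest := by
  intro rest
  induction rest with
  | nil => intro off; simp [PySem.List.enumerate_nil, pvFrom]
  | cons x xs ih =>
    intro off
    rw [PySem.List.enumerate_cons]
    simp only [List.map_cons, ih (off + 1)]
    rfl

theorem pvFrom_append (L : List String) (e : Int) (as bs : List String) (off : Int) :
    pvFrom L e off (as ++ bs) = pvFrom L e off as ++ pvFrom L e (off + as.length) bs := by
  induction as generalizing off with
  | nil => simp [pvFrom]
  | cons a as ih =>
    simp only [List.cons_append, pvFrom, ih (off + 1), List.length_cons]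
    rw [show off + 1 + (as.length : Int) = off + ((as.length : Int) + 1) by ring]
    push_cast
    ring_nf

theorem pvStable_iff (L : List String) (e n i : Int) :
    pvStable L e n i = true ↔
      e ≤ i ∧ i + e < n ∧
      ∀ j : Int, i - e ≤ j → j < i + e + 1 → PySem.List.pyGet? L j = some "towards" := by
  simp [pvStable, List.all_eq_true, PySem.List.mem_pyRange_one, and_assoc]

theorem pv_get_mid (done dw : List String) (m : Nat) (j : Nat) (hj : j < m) :
    PySem.List.pyGet? (done ++ (List.replicate m "towards" ++ dw)) ((done.length : Int) + j)
      = some "towards" := by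
  rw [show ((done.length : Int) + (j : Int)) = (((done.length + j : Nat) : Int)) by push_cast; ring]
  rw [PySem.List.pyGet?_natCast]
  rw [List.getElem?_append_right (by omega)]
  rw [Nat.add_sub_cancel_left]
  rw [List.getElem?_append_left (by simpa using hj)]
  simp [hj]

theorem pv_stable_char (done dw : List String) (m : Nat) (hm : 1 ≤ m) (e : Int) (he : 0 < e)
    (hleft : done.getLast? ≠ some "towards") (hright : dw.head? ≠ some "towards")
    (k : Nat) (hk : k < m) :
    pvStable (done ++ (List.replicate m "towards" ++ dw)) e
        ((done ++ (List.replicate m "towards" ++ dw)).length : Int)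
        ((done.length : Int) + k)
      = decide (e ≤ (k : Int) ∧ (k : Int) + e + 1 ≤ (m : Int)) := by
  set L := done ++ (List.replicate m "towards" ++ dw) with hL
  have hn : (L.length : Int) = (done.length : Int) + m + dw.length := by
    simp [hL]; ring
  by_cases hP : (e ≤ (k : Int) ∧ (k : Int) + e + 1 ≤ (m : Int))
  · rw [decide_eq_true hP]
    rw [pvStable_iff]
    refine ⟨by omega, by omega, ?_⟩
    intro j h1 h2
    have hj0 : (done.length : Int) ≤ j := by omega
    have hjm : j < (done.length : Int) + m := by omega
    obtain ⟨r, hr⟩ : ∃ r : Nat, j = (done.length : Int) + r ∧ r < m := by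
      refine ⟨(j - done.length).toNat, ?_, ?_⟩ <;> omega
    obtain ⟨hr1, hr2⟩ := hr
    rw [hr1]
    exact pv_get_mid done dw m r hr2
  · rw [decide_eq_false hP]
    rw [Bool.eq_false_iff]
    intro hs
    rw [pvStable_iff] at hs
    obtain ⟨hg1, hg2, hall⟩ := hs
    rcases (by omega : (k : Int) < e ∨ (m : Int) ≤ (k : Int) + e) with hc | hc
    · -- window reaches left of the run: index done.length - 1 is not 'towards'
      have hd : done ≠ [] := by
        intro h; subst h; simp at hg1; omega
      have hj := hall ((done.length : Int) - 1) (by omega) (by omega)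
      have hlen : 1 ≤ done.length := by
        cases done with
        | nil => exact absurd rfl hd
        | cons _ _ => simp
      rw [show ((done.length : Int) - 1) = (((done.length - 1 : Nat) : Int)) by omega] at hj
      rw [PySem.List.pyGet?_natCast] at hj
      rw [List.getElem?_append_left (by omega)] at hj
      rw [← List.getLast?_eq_getElem?] at hj
      exact hleft hj
    · -- window reaches right of the run: index done.length + m is not 'towards'
      have hdw : dw ≠ [] := by
        intro h; subst h
        rw [hn] at hg2
        simp at hg2
        omega
      have hj := hall ((done.length : Int) + m) (by omega) (by omega)
      rw [show ((done.length : Int) + (m : Int)) = (((done.length + m : Nat) : Int)) by push_cast; ring] at hj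
      rw [PySem.List.pyGet?_natCast] at hj
      rw [List.getElem?_append_right (by omega)] at hj
      rw [Nat.add_sub_cancel_left] at hj
      rw [List.getElem?_append_right (by simp)] at hj
      simp only [List.length_replicate, Nat.sub_self] at hj
      rw [← List.head?_eq_getElem?] at hj
      exact hright hj

theorem pvFrom_replicate (L : List String) (e : Int) (m : Nat) (v : String) (off : Int) :
    pvFrom L e off (List.replicate m v)
      = (List.range m).map (fun k : Nat => pvCell L e (off + (k : Int)) v) := by
  induction m with
  | zero => simp [pvFrom]
  | succ m ih =>
    rw [show m + 1 = m + 1 from rfl, List.replicate_add, List.range_succ, pvFrom_append]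
    rw [ih, List.map_append]
    simp [pvFrom]

theorem pv_pattern_eq (e : Int) (he : 0 < e) (m : Nat) :
    (List.range m).map (fun k : Nat =>
        if (e ≤ (k : Int) ∧ (k : Int) + e + 1 ≤ (m : Int)) then "towards" else "not_towards")
      = pvErodeRun e "towards" m := by
  rw [pvErodeRun, if_pos rfl]
  by_cases hshort : ((m : Int)) ≤ 2 * e
  · rw [if_pos hshort]
    have h1 : ∀ b ∈ (List.range m).map (fun k : Nat =>
        if (e ≤ (k : Int) ∧ (k : Int) + e + 1 ≤ (m : Int)) then "towards" else "not_towards"),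
        b = "not_towards" := by
      intro b hb
      obtain ⟨k, hk, rfl⟩ := List.mem_map.mp hb
      rw [List.mem_range] at hk
      rw [if_neg (by omega)]
    have h2 := List.eq_replicate_of_mem h1
    rw [h2]
    simp
  · rw [if_neg hshort]
    apply List.ext_getElem
    · simp only [List.length_map, List.length_range, List.length_append, List.length_replicate]
      omega
    · intro i h1 h2
      simp only [List.length_map, List.length_range] at h1
      simp only [List.getElem_map, List.getElem_range]
      by_cases hi1 : i < e.toNat
      · rw [if_neg (by omega)]
        rw [List.getElem_append_left (by simp only [List.length_append, List.length_replicate]; omega)]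
        rw [List.getElem_append_left (by simp only [List.length_replicate]; omega)]
        simp
      · by_cases hi2 : i < e.toNat + (m - 2 * e.toNat)
        · rw [if_pos (by constructor <;> omega)]
          rw [List.getElem_append_left (by simp only [List.length_append, List.length_replicate]; omega)]
          rw [List.getElem_append_right (by simp only [List.length_replicate]; omega)]
          simp
        · rw [if_neg (by omega)]
          rw [List.getElem_append_right (by simp only [List.length_append, List.length_replicate]; omega)]
          simp

theorem pvFrom_eq_runs_aux (e : Int) (he : 0 < e) (K : Nat) :
    ∀ (rest done : List String), rest.length ≤ K →
    (rest.head? = some "towards" → done.getLast? ≠ some "towards") →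
    pvFrom (done ++ rest) e (done.length : Int) rest = pvRuns e rest := by
  induction K with
  | zero =>
    intro rest done hk _
    obtain rfl : rest = [] := List.eq_nil_of_length_eq_zero (by omega)
    simp [pvFrom, pvRuns, pvRunLengths]
  | succ K ih =>
    intro rest done hk hleft
    cases rest with
    | nil => simp [pvFrom, pvRuns, pvRunLengths]
    | cons x xs =>
      by_cases hx : x = "towards"
      · subst hx
        have hdwtw := pv_tw_dw_nil (· == "towards") xs
        set dw := xs.dropWhile (· == "towards") with hdwdef
        set m := 1 + (xs.takeWhile (· == "towards")).length with hmdef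
        have hsplitlist : ("towards" : String) :: xs = List.replicate m "towards" ++ dw := by
          conv_lhs => rw [← List.takeWhile_append_dropWhile (p := (· == "towards")) (l := xs)]
          rw [show ("towards" : String) :: (xs.takeWhile (· == "towards") ++ xs.dropWhile (· == "towards"))
              = ("towards" :: xs.takeWhile (· == "towards")) ++ xs.dropWhile (· == "towards") from rfl]
        -- identify the head run as replicate m "towards"
          rw [hmdef, Nat.add_comm, List.replicate_succ]
          congr 2
          exact pv_tw_replicate xs "towards"
        have hright : dw.head? ≠ some "towards" := by
          cases hdw : dw with
          | nil => simp
          | cons d ds =>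
            rw [hdwdef] at hdw
            have := List.head?_dropWhile_not (· == "towards") xs
            rw [hdw] at this
            simp at this ⊢
            intro h; rw [h] at this; simp at this
        have hleft' : done.getLast? ≠ some "towards" := hleft (by simp)
        rw [hsplitlist, pvFrom_append]
        have hstep : pvFrom (done ++ (List.replicate m "towards" ++ dw)) e
            (done.length : Int) (List.replicate m "towards") = pvErodeRun e "towards" m := by
          rw [pvFrom_replicate]
          rw [← pv_pattern_eq e he m]
          apply List.map_congr_left
          intro k hkm
          rw [List.mem_range] at hkm
          rw [pvCell, if_neg (by simp)]
          rw [pv_stable_char done dw m (by omega) e he hleft' hright k hkm]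
          by_cases hp : (e ≤ (k : Int) ∧ (k : Int) + e + 1 ≤ (m : Int)) <;> simp [hp]
        rw [show done ++ (List.replicate m "towards" ++ dw)
            = (done ++ List.replicate m "towards") ++ dw from by simp] at hstep ⊢
        rw [hstep]
        have hrec : pvFrom ((done ++ List.replicate m "towards") ++ dw) e
            (((done ++ List.replicate m "towards").length : Nat) : Int) dw = pvRuns e dw := by
          apply ih dw (done ++ List.replicate m "towards")
          · have hxl : xs.length = (m - 1) + dw.length := by
              have : ("towards" :: xs).length = m + dw.length := by
                rw [hsplitlist]; simp
              simp at this; omega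
            have := List.length_dropWhile_le (· == "towards") xs
            simp at hk; omega
          · intro hhead; exact absurd hhead hright
        rw [show ((done.length : Int) + (List.replicate m "towards").length)
            = (((done ++ List.replicate m "towards").length : Nat) : Int) from by
          simp]
        rw [hrec]
        have : pvRuns e ("towards" :: xs) = pvErodeRun e "towards" m ++ pvRuns e dw := by
          rw [pvRuns_cons_towards, hmdef, hdwdef]
        rw [← hsplitlist, this]
      · -- non-'towards' head: the cell is the label itself
        simp only [pvFrom]
        rw [pvCell, if_pos (by simpa using hx)]
        rw [pvRuns_cons_ne e x xs hx]
        congr 1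
        have := ih xs (done ++ [x]) (by simp at hk; omega)
          (by intro _; simp [List.getLast?_append]; exact hx)
        rw [show (done ++ [x]) ++ xs = done ++ x :: xs from by simp] at this
        rw [show (((done ++ [x]).length : Nat) : Int) = (done.length : Int) + 1 from by
          simp] at this
        exact this

theorem pvFrom_eq_runs (e : Int) (he : 0 < e) (L : List String) :
    pvFrom L e 0 L = pvRuns e L := by
  have := pvFrom_eq_runs_aux e he L.length L [] (Nat.le_refl _) (by simp)
  simpa using this

-- ===== VERDICT (by name: the statement is the Claim_ definition above) =====
theorem erode_segment_boundaries_py_spec : Claim_equal_erode_segment_boundaries_py := by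
  intro labels erosion _
  unfold Spec_erode_segment_boundaries_py erode_segment_boundaries_py erode_segment_boundaries_py_alt
  by_cases h : erosion ≤ 0
  · simp [h]
  · rw [if_neg h, if_neg h]
    rw [pvErodeLoop_eq erosion (by omega) labels [] _ _ _ (by simp) (by simp) (by simp)]
    rw [pv_enum_map labels erosion labels 0, pvFrom_eq_runs erosion (by omega) labels]
    simp
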